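-- pv_equiv track=rewrite | github.com/oelarnes/mtg-stats | players.py | max_name_list
-- ===== SOURCE A (Python) =====
-- def max_name_list(names1, names2):
--   ret_names = []
--   for name in names1:
--     if not any([name2.startswith(name) for name2 in names2]):
--       ret_names.append(name)
--   for name in names2:
--     if not any([name1.startswith(name) and len(name1)>len(name) for name1 in names1]):
--       ret_names.append(name)
--   return ret_names
-- ===== SOURCE B (Python) =====
-- def _prefixes(s):
--     # all prefixes of s, shortest first, including s itself
--     if s == "":
--         return [""]
--     return [""] + [s[0] + p for p in _prefixes(s[1:])]
--
--
-- def max_name_list(names1, names2):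
--     pref2 = set()
--     for n in names2:
--         pref2.update(_prefixes(n))
--     prop1 = set()
--     for n in names1:
--         prop1.update(_prefixes(n)[:-1])
--     return [n for n in names1 if n not in pref2] + [n for n in names2 if n not in prop1]
-- ===== Notes on version B (the rewrite author's own statement) =====
-- stated objective: faster
-- what changed: Instead of scanning the other list with startswith for every name, B builds two hash sets once (all prefixes of names2, all proper prefixes of names1) and answers each prefix query with one set lookup.
import Mathlib
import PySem

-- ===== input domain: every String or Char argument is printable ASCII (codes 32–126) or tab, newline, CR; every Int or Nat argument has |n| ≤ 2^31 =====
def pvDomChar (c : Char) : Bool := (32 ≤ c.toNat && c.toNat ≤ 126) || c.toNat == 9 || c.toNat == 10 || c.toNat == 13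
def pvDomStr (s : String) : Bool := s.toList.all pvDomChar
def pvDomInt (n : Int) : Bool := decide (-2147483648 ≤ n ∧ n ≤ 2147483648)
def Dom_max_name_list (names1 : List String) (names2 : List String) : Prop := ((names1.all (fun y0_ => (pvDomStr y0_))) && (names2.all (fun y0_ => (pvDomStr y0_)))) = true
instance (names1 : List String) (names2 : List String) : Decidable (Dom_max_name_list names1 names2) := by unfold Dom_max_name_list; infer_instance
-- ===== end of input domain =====

-- B replaces A's O(n·m) pairwise startswith scans with two prefix-sets built once, one O(1)-lookup per name.

-- ===== PORT A =====
def max_name_list (names1 : List String) (names2 : List String) : List String :=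
  let ret1 := names1.foldl (fun acc name =>
    if !((names2.map (fun name2 => PySem.Str.startswith name2 name)).any id)
    then acc ++ [name] else acc) []
  names2.foldl (fun acc name =>
    if !((names1.map (fun name1 => PySem.Str.startswith name1 name &&
          decide (PySem.Str.len name < PySem.Str.len name1))).any id)
    then acc ++ [name] else acc) ret1

-- ===== PORT B =====
-- _prefixes(s): all prefixes of s, shortest first, including s itself (recursion on the characters, as in Source B)
def pvPrefixesC : List Char → List (List Char)
  | [] => [[]]
  | c :: rest => [] :: (pvPrefixesC rest).map (fun p => c :: p)

def pvPrefixes (s : String) : List String := (pvPrefixesC s.toList).map (fun cs => String.ofList cs)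

def max_name_list_alt (names1 : List String) (names2 : List String) : List String :=
  let pref2 : PySem.Set String :=
    names2.foldl (fun s n => PySem.Set.update s (pvPrefixes n)) PySem.Set.empty
  let prop1 : PySem.Set String :=
    names1.foldl (fun s n => PySem.Set.update s (PySem.List.slice (pvPrefixes n) none (some (-1)))) PySem.Set.empty
  names1.filter (fun n => !(PySem.Set.contains pref2 n)) ++
    names2.filter (fun n => !(PySem.Set.contains prop1 n))

-- ===== PRECONDITION & SPEC =====
def Spec_max_name_list (names1 : List String) (names2 : List String) (out : List String) : Prop := out = max_name_list_alt names1 names2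
instance (names1 : List String) (names2 : List String) (out : List String) : Decidable (Spec_max_name_list names1 names2 out) := by unfold Spec_max_name_list; infer_instance

-- ===== CLAIM (what is proved, stated in full; the proofs are below) =====
def Claim_equal_max_name_list : Prop := ∀ (names1 : List String) (names2 : List String), Dom_max_name_list names1 names2 → Spec_max_name_list names1 names2 (max_name_list names1 names2)

-- ===== LEMMAS AND PROOFS =====

theorem pvPrefixesC_ne_nil (s : List Char) : pvPrefixesC s ≠ [] := by
  cases s <;> simp [pvPrefixesC]

theorem mem_pvPrefixesC (p s : List Char) : p ∈ pvPrefixesC s ↔ p <+: s := by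
  induction s generalizing p with
  | nil => simp [pvPrefixesC]
  | cons c rest ih =>
    simp only [pvPrefixesC, List.mem_cons, List.mem_map, List.prefix_cons_iff]
    constructor
    · rintro (rfl | ⟨q, hq, rfl⟩)
      · exact Or.inl rfl
      · exact Or.inr ⟨q, rfl, (ih q).mp hq⟩
    · rintro (rfl | ⟨t, rfl, ht⟩)
      · exact Or.inl rfl
      · exact Or.inr ⟨t, (ih t).mpr ht, rfl⟩

theorem mem_dropLast_pvPrefixesC (p s : List Char) :
    p ∈ (pvPrefixesC s).dropLast ↔ p <+: s ∧ p ≠ s := by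
  induction s generalizing p with
  | nil => simp [pvPrefixesC]
  | cons c rest ih =>
    have hne : (pvPrefixesC rest).map (fun p => c :: p) ≠ [] := by
      simp [pvPrefixesC_ne_nil]
    rw [pvPrefixesC, List.dropLast_cons_of_ne_nil hne, ← List.map_dropLast]
    simp only [List.mem_cons, List.mem_map]
    constructor
    · rintro (rfl | ⟨q, hq, rfl⟩)
      · exact ⟨List.nil_prefix, by simp⟩
      · obtain ⟨h1, h2⟩ := (ih q).mp hq
        exact ⟨List.prefix_cons_iff.mpr (Or.inr ⟨q, rfl, h1⟩), by simpa using h2⟩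
    · rintro ⟨hpre, hne'⟩
      rcases List.prefix_cons_iff.mp hpre with rfl | ⟨t, rfl, ht⟩
      · exact Or.inl rfl
      · exact Or.inr ⟨t, (ih t).mpr ⟨ht, by simpa using hne'⟩, rfl⟩

theorem mem_pvPrefixes (p n : String) : p ∈ pvPrefixes n ↔ p.toList <+: n.toList := by
  simp only [pvPrefixes, List.mem_map]
  constructor
  · rintro ⟨cs, hcs, rfl⟩
    simpa using (mem_pvPrefixesC cs n.toList).mp hcs
  · intro h
    exact ⟨p.toList, (mem_pvPrefixesC _ _).mpr h, String.ofList_toList⟩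

theorem mem_dropLast_pvPrefixes (p n : String) :
    p ∈ (pvPrefixes n).dropLast ↔ p.toList <+: n.toList ∧ p ≠ n := by
  simp only [pvPrefixes, ← List.map_dropLast, List.mem_map]
  constructor
  · rintro ⟨cs, hcs, rfl⟩
    obtain ⟨h1, h2⟩ := (mem_dropLast_pvPrefixesC cs n.toList).mp hcs
    refine ⟨by simpa using h1, ?_⟩
    intro hEq
    exact h2 (by simpa using congrArg String.toList hEq)
  · rintro ⟨hpre, hne⟩
    refine ⟨p.toList, (mem_dropLast_pvPrefixesC _ _).mpr ⟨hpre, fun h => hne (String.toList_inj.mp h)⟩,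
      String.ofList_toList⟩

theorem mem_foldl_update (f : String → List String) (l : List String) (s : PySem.Set String) (x : String) :
    x ∈ l.foldl (fun s n => PySem.Set.update s (f n)) s ↔ x ∈ s ∨ ∃ n ∈ l, x ∈ f n := by
  induction l generalizing s with
  | nil => simp
  | cons a t ih =>
    rw [List.foldl_cons, ih]
    rw [PySem.Set.mem_update]
    simp only [List.mem_cons]
    constructor
    · rintro ((h | h) | ⟨n, hn, hx⟩)
      · exact Or.inl h
      · exact Or.inr ⟨a, Or.inl rfl, h⟩
      · exact Or.inr ⟨n, Or.inr hn, hx⟩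
    · rintro (h | ⟨n, (rfl | hn), hx⟩)
      · exact Or.inl (Or.inl h)
      · exact Or.inl (Or.inr hx)
      · exact Or.inr ⟨n, hn, hx⟩

-- a strict-prefix membership relation: name is a prefix of n1 and strictly shorter
theorem strict_prefix_iff (p n : String) :
    (p.toList <+: n.toList ∧ p ≠ n) ↔ (p.toList <+: n.toList ∧ p.toList.length < n.toList.length) := by
  constructor
  · rintro ⟨h, hne⟩
    refine ⟨h, lt_of_le_of_ne (List.IsPrefix.length_le h) ?_⟩
    intro hlen
    exact hne (String.toList_inj.mp (List.IsPrefix.eq_of_length h hlen))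
  · rintro ⟨h, hlt⟩
    refine ⟨h, ?_⟩
    rintro rfl
    omega

theorem max_name_list_spec_aux (names1 names2 : List String) :
    max_name_list names1 names2 = max_name_list_alt names1 names2 := by
  unfold max_name_list max_name_list_alt
  simp only [PySem.List.slice_to_neg_one, PySem.List.foldl_append_if, List.map_id', List.nil_append]
  congr 1
  · apply List.filter_congr
    intro name _
    congr 1
    rw [Bool.eq_iff_iff]
    simp only [List.any_map, List.any_eq_true, id_eq, Function.comp_apply,
      PySem.Set.contains_iff, mem_foldl_update, PySem.Str.startswith_eq,
      PySem.Chars.startswith_iff, mem_pvPrefixes]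
    constructor
    · rintro ⟨n2, hn2, h⟩; exact Or.inr ⟨n2, hn2, h⟩
    · rintro (h | ⟨n2, hn2, h⟩)
      · simp [PySem.Set.empty] at h
      · exact ⟨n2, hn2, h⟩
  · apply List.filter_congr
    intro name _
    congr 1
    rw [Bool.eq_iff_iff]
    simp only [List.any_map, List.any_eq_true, id_eq, Function.comp_apply, Bool.and_eq_true,
      decide_eq_true_eq, PySem.Set.contains_iff, mem_foldl_update, PySem.Str.startswith_eq,
      PySem.Chars.startswith_iff, mem_dropLast_pvPrefixes, PySem.Str.len_eq]
    constructor
    · rintro ⟨n1, hn1, hpre, hlt⟩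
      refine Or.inr ⟨n1, hn1, (strict_prefix_iff name n1).mpr ⟨hpre, by exact_mod_cast hlt⟩⟩
    · rintro (h | ⟨n1, hn1, h⟩)
      · simp [PySem.Set.empty] at h
      · obtain ⟨hpre, hlt⟩ := (strict_prefix_iff name n1).mp h
        exact ⟨n1, hn1, hpre, by exact_mod_cast hlt⟩

-- ===== VERDICT (by name: the statement is the Claim_ definition above) =====
theorem max_name_list_spec : Claim_equal_max_name_list := by
  intro names1 names2 _
  exact max_name_list_spec_aux names1 names2
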